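-- pv_equiv track=rewrite | github.com/vwang0/Leetcode_Solutions | Algorithms_medium/0651. 4 Keys Keyboard.py | maxA
-- ===== SOURCE A (Python) =====
-- def maxA(N: int) -> int:
--     best = [0, 1]
--     for x in range(2, N+1):
--         cur = best[x-1] + 1
--         for y in range(x-1):
--             cur = max(cur, best[y] * (x-y-1))
--         best.append(cur)
--     return best[N]
-- ===== SOURCE B (Python) =====
-- def maxA(N: int) -> int:
--     # O(N) with O(1) state: only break points 4 or 5 steps back can be optimal.
--     if N < 0:
--         return 0
--     if N < 7:
--         return N
--     w = (2, 3, 4, 5, 6)  # dp values for the last five keystroke counts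
--     for _ in range(N - 6):
--         w = w[1:] + (max(3 * w[1], 4 * w[0]),)
--     return w[-1]
-- ===== Notes on version B (the rewrite author's own statement) =====
-- stated objective: faster
-- what changed: Replaces the O(N^2) DP (full table, inner scan over all break points) by an O(N) sliding window of the last five dp values, using the fact dp[n] = max(3*dp[n-4], 4*dp[n-5]) for n >= 7.
-- intended difference: For N = -1 A's best[-1] wraps around to best[1] and returns 1 although no keystroke is available; B returns 0, the number of A's typable with no keystrokes. — e.g. on maxA(-1): A returns 1, B returns 0
import Mathlib
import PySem

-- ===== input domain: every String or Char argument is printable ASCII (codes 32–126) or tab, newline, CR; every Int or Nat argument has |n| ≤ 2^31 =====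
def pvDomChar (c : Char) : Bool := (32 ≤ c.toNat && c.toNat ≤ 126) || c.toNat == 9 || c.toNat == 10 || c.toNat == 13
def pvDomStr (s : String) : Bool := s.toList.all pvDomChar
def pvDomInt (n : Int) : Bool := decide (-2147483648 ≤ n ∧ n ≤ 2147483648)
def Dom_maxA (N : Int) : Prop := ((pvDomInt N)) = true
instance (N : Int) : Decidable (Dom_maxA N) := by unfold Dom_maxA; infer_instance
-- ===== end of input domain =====

-- B replaces A's O(N^2) full-table DP by an O(N) sliding window of the last five dp
-- values (dp[n] = max(3*dp[n-4], 4*dp[n-5]) for n ≥ 7); objective: faster (asymptotic).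

-- ===== PORT A =====
def maxA (N : Int) : Int :=
  let best := (PySem.List.pyRange 2 (N + 1) 1).foldl (fun best x =>
    let cur := PySem.List.pyGetD best (x - 1) 0 + 1
    let cur := (PySem.List.pyRange 0 (x - 1) 1).foldl
      (fun cur y => max cur (PySem.List.pyGetD best y 0 * (x - y - 1))) cur
    best ++ [cur]) [0, 1]
  PySem.List.pyGetD best N 0

-- ===== PORT B =====
-- w = w[1:] + (max(3*w[1], 4*w[0]),)
def bStep (w : Int × Int × Int × Int × Int) : Int × Int × Int × Int × Int :=
  (w.2.1, w.2.2.1, w.2.2.2.1, w.2.2.2.2, max (3 * w.2.1) (4 * w.1))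

-- for _ in range(N-6): w = bStep w
def bLoop : Nat → (Int × Int × Int × Int × Int) → Int × Int × Int × Int × Int
  | 0, w => w
  | k + 1, w => bLoop k (bStep w)

def maxA_alt (N : Int) : Int :=
  if N < 0 then 0
  else if N < 7 then N
  else (bLoop (N - 6).toNat (2, 3, 4, 5, 6)).2.2.2.2

-- ===== PRECONDITION & SPEC =====
-- Pre_ excludes N ≤ -3, where A's best[N] raises IndexError (best has length 2 there).
def Pre_maxA (N : Int) : Prop := -2 ≤ N
instance (N : Int) : Decidable (Pre_maxA N) := by unfold Pre_maxA; infer_instance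
def pvWitness_maxA : Int := 5

-- For N = -1 A's best[-1] wraps around to best[1] and returns 1 although no keystroke
-- is available; B returns 0, the number of A's typable with no keystrokes.
def D_maxA (N : Int) : Prop := N = -1
instance (N : Int) : Decidable (D_maxA N) := by unfold D_maxA; infer_instance

def Spec_maxA (N : Int) (out : Int) : Prop := ¬ D_maxA N → out = maxA_alt N
instance (N : Int) (out : Int) : Decidable (Spec_maxA N out) := by unfold Spec_maxA; infer_instance

def pvDiffWitness_maxA : Int := -1
def pvDiffWitnessOut_maxA : Int × Int := (1, 0)

-- ===== CLAIM (what is proved, stated in full; the proofs are below) =====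
def Claim_unchanged_maxA : Prop := ∀ (N : Int), Dom_maxA N → Pre_maxA N → Spec_maxA N (maxA N)
def Claim_changed_maxA : Prop := Dom_maxA (pvDiffWitness_maxA) ∧ Pre_maxA (pvDiffWitness_maxA) ∧ D_maxA (pvDiffWitness_maxA) ∧ maxA (pvDiffWitness_maxA) = pvDiffWitnessOut_maxA.1 ∧ maxA_alt (pvDiffWitness_maxA) = pvDiffWitnessOut_maxA.2 ∧ pvDiffWitnessOut_maxA.1 ≠ pvDiffWitnessOut_maxA.2
def Claim_exact_maxA : Prop := ∀ (N : Int), Dom_maxA N → Pre_maxA N → D_maxA N → maxA N ≠ maxA_alt N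

-- ===== LEMMAS AND PROOFS =====

-- the common mathematical function: f n = max A's with n keystrokes
def f : Nat → Int
  | 0 => 0
  | 1 => 1
  | 2 => 2
  | 3 => 3
  | 4 => 4
  | 5 => 5
  | 6 => 6
  | n + 7 => max (3 * f (n + 3)) (4 * f (n + 2))

theorem f_small {n : Nat} (h : n < 7) : f n = n := by
  interval_cases n <;> rfl

theorem f_add7 (n : Nat) : f (n + 7) = max (3 * f (n + 3)) (4 * f (n + 2)) := rfl

theorem f_nonneg : ∀ n, 0 ≤ f n := by
  intro n
  induction n using Nat.strong_induction_on with
  | _ n ih =>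
    match n with
    | 0 | 1 | 2 | 3 | 4 | 5 | 6 => simp [f]
    | m + 7 =>
      rw [f_add7]
      have h1 := ih (m + 3) (by omega)
      have h2 := ih (m + 2) (by omega)
      have : (0:Int) ≤ 3 * f (m + 3) := by positivity
      exact le_max_of_le_left this

theorem f_succ : ∀ n, f n + 1 ≤ f (n + 1) := by
  intro n
  induction n using Nat.strong_induction_on with
  | _ n ih =>
    match n with
    | 0 | 1 | 2 | 3 | 4 | 5 | 6 => decide
    | m + 7 =>
      have h1 := ih (m + 3) (by omega)
      have h2 := ih (m + 2) (by omega)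
      rw [f_add7, show m + 7 + 1 = (m + 1) + 7 by ring, f_add7]
      have e1 : m + 1 + 3 = m + 3 + 1 := by ring
      have e2 : m + 1 + 2 = m + 2 + 1 := by ring
      rw [e1, e2]
      rcases max_cases (3 * f (m + 3)) (4 * f (m + 2)) with ⟨heq, _⟩ | ⟨heq, _⟩ <;> rw [heq]
      · exact le_max_of_le_left (by nlinarith)
      · exact le_max_of_le_right (by nlinarith)

theorem f_mono {m n : Nat} (h : m ≤ n) : f m ≤ f n := by
  induction n with
  | zero => simp_all
  | succ k ih =>
    rcases Nat.lt_or_ge m (k + 1) with hm | hm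
    · exact le_trans (ih (by omega)) (by have := f_succ k; omega)
    · have : m = k + 1 := by omega
      simp [this]

-- 2*f n ≤ f (n+3)
theorem f_ratio3 : ∀ n, 2 * f n ≤ f (n + 3) := by
  intro n
  induction n using Nat.strong_induction_on with
  | _ n ih =>
    match n with
    | 0 | 1 | 2 | 3 | 4 | 5 | 6 => decide
    | m + 7 =>
      have h1 := ih (m + 3) (by omega)
      have h2 := ih (m + 2) (by omega)
      rw [f_add7, show m + 7 + 3 = (m + 3) + 7 by ring, f_add7]
      rw [show m + 3 + 2 = m + 2 + 3 by ring]
      rcases max_cases (3 * f (m + 3)) (4 * f (m + 2)) with ⟨heq, _⟩ | ⟨heq, _⟩ <;> rw [heq]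
      · exact le_max_of_le_left (by nlinarith)
      · exact le_max_of_le_right (by nlinarith)

-- 5*f n ≤ f (n+6)
theorem f_ratio6 : ∀ n, 5 * f n ≤ f (n + 6) := by
  intro n
  induction n using Nat.strong_induction_on with
  | _ n ih =>
    match n with
    | 0 | 1 | 2 | 3 | 4 | 5 | 6 => decide
    | m + 7 =>
      have h1 := ih (m + 3) (by omega)
      have h2 := ih (m + 2) (by omega)
      rw [f_add7, show m + 7 + 6 = (m + 6) + 7 by ring, f_add7]
      rw [show m + 6 + 3 = m + 3 + 6 by ring, show m + 6 + 2 = m + 2 + 6 by ring]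
      rcases max_cases (3 * f (m + 3)) (4 * f (m + 2)) with ⟨heq, _⟩ | ⟨heq, _⟩ <;> rw [heq]
      · exact le_max_of_le_left (by nlinarith)
      · exact le_max_of_le_right (by nlinarith)

-- every break point y is dominated: f y * (g-1) ≤ f (y+g) for a gap g ≥ 2
theorem f_break (y : Nat) : ∀ g : Nat, 2 ≤ g → f y * ((g : Int) - 1) ≤ f (y + g) := by
  intro g
  induction g using Nat.strong_induction_on with
  | _ g ih =>
    intro hg
    match g, hg with
    | 2, _ =>
      have := f_mono (show y ≤ y + 2 by omega)
      push_cast; linarith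
    | 3, _ =>
      have := f_ratio3 y
      push_cast; linarith
    | 4, _ =>
      match y with
      | 0 | 1 | 2 => decide
      | t + 3 =>
        rw [show t + 3 + 4 = t + 7 by omega, f_add7]
        exact le_max_of_le_left (by push_cast; linarith)
    | 5, _ =>
      match y with
      | 0 | 1 => decide
      | t + 2 =>
        rw [show t + 2 + 5 = t + 7 by omega, f_add7]
        exact le_max_of_le_right (by push_cast; linarith)
    | 6, _ =>
      have := f_ratio6 y
      push_cast; linarith
    | 7, _ =>
      have h3 := f_ratio3 y
      have hm := f_mono (show y + 3 + 3 ≤ y + 3 + 4 by omega)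
      have h3' := f_ratio3 (y + 3)
      rw [show y + 7 = y + 7 by omega, f_add7]
      refine le_max_of_le_left ?_
      push_cast; nlinarith [f_nonneg y]
    | t + 8, _ =>
      have hih := ih (t + 3) (by omega) (by omega)
      rw [show y + (t + 8) = (y + t + 1) + 7 by omega, f_add7]
      refine le_max_of_le_right ?_
      rw [show y + t + 1 + 2 = y + (t + 3) by omega]
      have hnn := f_nonneg y
      push_cast at hih ⊢
      nlinarith

-- the term contributed by break point y, as A's inner loop computes it
def innerTerm (x : Nat) (y : Int) : Int :=
  PySem.List.pyGetD ((List.range x).map f) y 0 * ((x : Int) - y - 1)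

theorem innerTerm_natCast (x k : Nat) (hk : k < x) :
    innerTerm x (k : Int) = f k * ((x : Int) - (k : Int) - 1) := by
  unfold innerTerm
  rw [PySem.List.pyGetD_natCast, PySem.List.getD_map_range f x k 0 hk]

-- inner loop computes f x
theorem inner_loop (x : Nat) (hx : 2 ≤ x) :
    ((PySem.List.pyRange 0 ((x : Int) - 1) 1).foldl
      (fun cur y => max cur (innerTerm x y)) (f (x - 1) + 1)) = f x := by
  have hstart : f (x - 1) + 1 ≤ f x := by
    have := f_succ (x - 1)
    rw [show x - 1 + 1 = x by omega] at this
    exact this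
  apply le_antisymm
  · -- every intermediate value is ≤ f x
    rw [← List.foldl_map]
    rcases PySem.List.foldl_max_mem
        ((PySem.List.pyRange 0 ((x : Int) - 1) 1).map (innerTerm x)) (f (x - 1) + 1) with h | h
    · rw [h]; exact hstart
    · obtain ⟨y, hyL, hyg⟩ := List.mem_map.mp h
      rw [← hyg]
      obtain ⟨hy0, hylt⟩ := PySem.List.mem_pyRange_one.mp hyL
      have hyk : y = (y.toNat : Int) := by omega
      have hkx : y.toNat + 2 ≤ x := by omega
      rw [hyk, innerTerm_natCast x y.toNat (by omega)]
      have hb := f_break y.toNat (x - y.toNat) (by omega)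
      rw [show y.toNat + (x - y.toNat) = x by omega,
          Nat.cast_sub (by omega : y.toNat ≤ x)] at hb
      linarith
  · -- f x is attained: by the start for x < 7, by break point x-4 or x-5 for x ≥ 7
    have hfold := PySem.List.le_foldl_max_int
      (PySem.List.pyRange 0 ((x : Int) - 1) 1) (innerTerm x) (f (x - 1) + 1)
    by_cases h7 : x < 7
    · have hsm : f x = f (x - 1) + 1 := by
        rw [f_small h7, f_small (by omega : x - 1 < 7)]; omega
      rw [hsm]; exact hfold.1
    · push Not at h7
      have hfx : f x = max (3 * f (x - 4)) (4 * f (x - 5)) := by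
        conv_lhs => rw [show x = (x - 7) + 7 by omega]
        rw [f_add7, show x - 7 + 3 = x - 4 by omega, show x - 7 + 2 = x - 5 by omega]
      have t1 := hfold.2 ((x - 4 : Nat) : Int)
        (PySem.List.mem_pyRange_one.mpr ⟨by omega, by omega⟩)
      have t2 := hfold.2 ((x - 5 : Nat) : Int)
        (PySem.List.mem_pyRange_one.mpr ⟨by omega, by omega⟩)
      rw [innerTerm_natCast x (x - 4) (by omega),
          show (x : Int) - ((x - 4 : Nat) : Int) - 1 = 3 by omega] at t1
      rw [innerTerm_natCast x (x - 5) (by omega),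
          show (x : Int) - ((x - 5 : Nat) : Int) - 1 = 4 by omega] at t2
      rw [hfx]
      apply max_le <;> linarith

-- outer loop invariant
theorem outer_loop (n : Nat) :
    ((PySem.List.pyRange 2 ((n : Int) + 2) 1).foldl (fun best x =>
      let cur := PySem.List.pyGetD best (x - 1) 0 + 1
      let cur := (PySem.List.pyRange 0 (x - 1) 1).foldl
        (fun cur y => max cur (PySem.List.pyGetD best y 0 * (x - y - 1))) cur
      best ++ [cur]) [0, 1]) = (List.range (n + 2)).map f := by
  induction n with
  | zero =>
    rw [show ((0 : Nat) : Int) + 2 = 2 by norm_num, PySem.List.pyRange_one_eq_nil le_rfl]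
    simp [List.range_succ]
    decide
  | succ n ih =>
    rw [show ((n + 1 : Nat) : Int) + 2 = ((n : Int) + 2) + 1 by push_cast; ring,
        PySem.List.pyRange_one_succ_right (by omega), List.foldl_append, ih]
    simp only [List.foldl_cons, List.foldl_nil]
    have hx1 : (n : Int) + 2 - 1 = ((n + 1 : Nat) : Int) := by push_cast; ring
    rw [hx1, PySem.List.pyGetD_natCast,
        PySem.List.getD_map_range f (n + 2) (n + 1) 0 (by omega)]
    have hinner := inner_loop (n + 2) (by omega)
    rw [show ((n + 2 : Nat) : Int) = (n : Int) + 2 by push_cast; ring,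
        show n + 2 - 1 = n + 1 by omega] at hinner
    unfold innerTerm at hinner
    push_cast at hinner ⊢
    rw [show (n : Int) + 2 - 1 = (n : Int) + 1 by ring] at hinner
    rw [hinner]
    show _ = List.map f (List.range ((n + 2) + 1))
    simp [List.range_succ]


theorem maxA_eq_f (N : Int) (h : 0 ≤ N) : maxA N = f N.toNat := by
  rcases Int.lt_or_le N 1 with h1 | h1
  · have : N = 0 := by omega
    subst this; decide
  · show PySem.List.pyGetD _ N 0 = f N.toNat
    have hn : N + 1 = ((N.toNat - 1 : Nat) : Int) + 2 := by omega
    rw [hn, outer_loop (N.toNat - 1)]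
    set L := List.map f (List.range (N.toNat - 1 + 2)) with hL
    rw [show N = ((N.toNat : Nat) : Int) by omega, PySem.List.pyGetD_natCast]
    simp only [Int.toNat_natCast]
    rw [hL, PySem.List.getD_map_range f (N.toNat - 1 + 2) N.toNat 0 (by omega)]

theorem bLoop_spec : ∀ k j, bLoop k (f (j+2), f (j+3), f (j+4), f (j+5), f (j+6))
    = (f (j+k+2), f (j+k+3), f (j+k+4), f (j+k+5), f (j+k+6)) := by
  intro k
  induction k with
  | zero => intro j; rfl
  | succ k ih =>
    intro j
    show bLoop k (bStep _) = _
    have hstep : bStep (f (j+2), f (j+3), f (j+4), f (j+5), f (j+6))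
        = (f (j+1+2), f (j+1+3), f (j+1+4), f (j+1+5), f (j+1+6)) := by
      simp only [bStep]
      rw [show f (j+1+6) = max (3 * f (j+3)) (4 * f (j+2)) from f_add7 j]
    rw [hstep, ih (j+1)]
    simp only [show j+1+k+2 = j+(k+1)+2 from by omega, show j+1+k+3 = j+(k+1)+3 from by omega,
      show j+1+k+4 = j+(k+1)+4 from by omega, show j+1+k+5 = j+(k+1)+5 from by omega,
      show j+1+k+6 = j+(k+1)+6 from by omega]

theorem alt_eq_f (N : Int) (h : 0 ≤ N) : maxA_alt N = f N.toNat := by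
  unfold maxA_alt
  rcases Nat.lt_or_ge N.toNat 7 with h7 | h7
  · rw [if_neg (by omega), if_pos (by omega), f_small h7]; omega
  · rw [if_neg (by omega), if_neg (by omega)]
    have hk : (N - 6).toNat = (N.toNat - 6) := by omega
    have : ((2:Int), (3:Int), (4:Int), (5:Int), (6:Int))
        = (f 2, f 3, f 4, f 5, f 6) := by decide
    rw [hk, this, bLoop_spec (N.toNat - 6) 0]
    show f (0 + (N.toNat - 6) + 6) = f N.toNat
    congr 1
    omega

-- ===== VERDICT (by name: the statement is the Claim_ definition above) =====
theorem maxA_spec : Claim_unchanged_maxA := by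
  intro N hdom hpre hnd
  unfold Pre_maxA at hpre
  unfold D_maxA at hnd
  rcases Int.lt_or_le N 0 with hneg | hpos
  · have : N = -2 := by omega
    subst this; decide
  · rw [maxA_eq_f N hpos, alt_eq_f N hpos]

theorem maxA_changed : Claim_changed_maxA := by unfold Claim_changed_maxA; decide

theorem maxA_tight : Claim_exact_maxA := by
  intro N _ _ hd
  unfold D_maxA at hd
  subst hd
  decide
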